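-- pv_equiv track=rewrite | github.com/qwerty22121998/Amethyst-Mod-Manager | src/gui/install_mod.py | _build_tree_str
-- ===== SOURCE A (Python) =====
-- def _build_tree_str(paths: list[str]) -> str:
--     """Convert a flat list of slash-separated paths into an ASCII folder tree."""
--     root: dict = {}
--     for path in sorted(paths):
--         node = root
--         for part in path.split("/"):
--             node = node.setdefault(part, {})
--
--     lines: list[str] = []
--
--     def _walk(node: dict, prefix: str):
--         items = sorted(node.keys())
--         for i, name in enumerate(items):
--             is_last = (i == len(items) - 1)
--             lines.append(f"{prefix}{'└── ' if is_last else '├── '}{name}")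
--             child = node[name]
--             if child:
--                 _walk(child, prefix + ("    " if is_last else "│   "))
--
--     _walk(root, "")
--     return "\n".join(lines) if lines else "(no files)"
-- ===== SOURCE B (Python) =====
-- def _build_tree_str(paths: list[str]) -> str:
--     """Convert a flat list of slash-separated paths into an ASCII folder tree.
--
--     Single recursive pass over segment-lists: group by head, no intermediate
--     nested-dict tree is ever built."""
--     out: list[str] = []
--
--     def render(suffixes: list[list[str]], prefix: str):
--         groups: dict = {}
--         for s in suffixes:
--             groups.setdefault(s[0], []).append(s[1:])
--         names = sorted(groups)
--         for i, name in enumerate(names):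
--             last = i == len(names) - 1
--             out.append(prefix + ("└── " if last else "├── ") + name)
--             rest = [t for t in groups[name] if t]
--             if rest:
--                 render(rest, prefix + ("    " if last else "│   "))
--
--     render([p.split("/") for p in sorted(paths)], "", )
--     return "\n".join(out) if out else "(no files)"
-- ===== Notes on version B (the rewrite author's own statement) =====
-- stated objective: alternative
-- what changed: A builds a nested-dict trie in one phase and then walks it with a separate recursive emitter; B never builds a tree: it renders in a single recursive pass over path-suffix segment lists, grouping them by head segment at each level.
import Mathlib
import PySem

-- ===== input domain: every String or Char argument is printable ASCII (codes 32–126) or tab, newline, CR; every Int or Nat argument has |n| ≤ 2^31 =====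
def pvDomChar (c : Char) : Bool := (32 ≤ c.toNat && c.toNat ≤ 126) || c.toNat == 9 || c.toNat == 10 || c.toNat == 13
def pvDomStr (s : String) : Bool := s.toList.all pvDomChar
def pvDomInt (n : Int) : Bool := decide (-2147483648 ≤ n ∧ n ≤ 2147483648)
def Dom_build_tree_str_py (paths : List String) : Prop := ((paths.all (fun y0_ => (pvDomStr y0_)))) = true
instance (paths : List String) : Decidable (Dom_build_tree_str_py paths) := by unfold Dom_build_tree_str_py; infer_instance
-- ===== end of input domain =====

-- B renders the tree in ONE recursive pass that groups path-suffix lists by head segment,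
-- instead of A's two phases (build a nested dict trie, then walk it); objective: alternative decomposition.

-- ===== PORT A =====
-- Python nested dicts (str -> dict) cannot be a nested inductive in Lean; PTrie is the
-- standard flattened encoding: `cons k c rest` = entry (k ↦ children c), then the rest of
-- the entries, in insertion order; `nil` = {}.
inductive PTrie where
  | nil : PTrie
  | cons : String → PTrie → PTrie → PTrie
deriving DecidableEq, Repr

-- `node = root; for part in parts: node = node.setdefault(part, {})` — functionally: insert
-- the segment list into the trie (dict setdefault: existing key keeps its place, new key appends).
def insertSegs : PTrie → List String → PTrie
  | t, [] => t
  | PTrie.nil, h :: r => PTrie.cons h (insertSegs PTrie.nil r) PTrie.nil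
  | PTrie.cons k c rest, h :: r =>
      if k = h then PTrie.cons k (insertSegs c r) rest
      else PTrie.cons k c (insertSegs rest (h :: r))
termination_by t segs => (segs.length, sizeOf t)

-- node.keys() (insertion order)
def trieKeys : PTrie → List String
  | PTrie.nil => []
  | PTrie.cons k _ rest => k :: trieKeys rest

-- node[name] (the walk only looks up keys that are present; absent key ↦ nil never occurs)
def trieGet : PTrie → String → PTrie
  | PTrie.nil, _ => PTrie.nil
  | PTrie.cons k c rest, n => if k = n then c else trieGet rest n

-- termination helper for walkA (cited in decreasing_by)
theorem trieGet_sizeOf_lt (t : PTrie) (n : String) (h : trieGet t n ≠ PTrie.nil) :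
    sizeOf (trieGet t n) < sizeOf t := by
  induction t with
  | nil => simp [trieGet] at h
  | cons k c rest ihc ihr =>
    rw [trieGet] at h ⊢
    by_cases hk : k = n
    · rw [if_pos hk] at h ⊢; simp; omega
    · rw [if_neg hk] at h ⊢; have := ihr h; simp; omega

-- _walk: the loop `for i, name in enumerate(items): lines.append(line); if child: _walk(...)`
-- appends per-item blocks in order, i.e. the flatMap of the blocks.
def walkA (t : PTrie) (pre : String) : List String :=
  let items := PySem.List.sorted (trieKeys t) (fun x => x) false
  (PySem.List.enumerate items).flatMap (fun e =>
    (pre ++ (if e.1 == (items.length : Int) - 1 then "└── " else "├── ") ++ e.2) ::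
    (if h : trieGet t e.2 = PTrie.nil then []
     else walkA (trieGet t e.2) (pre ++ (if e.1 == (items.length : Int) - 1 then "    " else "│   "))))
termination_by sizeOf t
decreasing_by exact trieGet_sizeOf_lt t e.2 h

def build_tree_str_py (paths : List String) : String :=
  -- path.split("/"): split? is none only for sep = "", impossible here, so getD [] is dead
  let root := (PySem.List.sorted paths (fun x => x) false).foldl
      (fun t p => insertSegs t ((PySem.Str.split? p "/").getD [])) PTrie.nil
  let lines := walkA root ""
  if lines = [] then "(no files)" else PySem.Str.join "\n" lines

-- ===== PORT B =====
-- groups.setdefault(s[0], []).append(s[1:]); every suffix B ever groups is nonempty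
-- (split never yields [], and recursion filters empties), so the [] arm is dead.
def groupStep (d : PySem.Dict String (List (List String))) (s : List String) :
    PySem.Dict String (List (List String)) :=
  match s with
  | [] => d
  | h :: t => PySem.Dict.modify d h [] (fun l => l ++ [t])

-- total number of segments (termination measure for render)
def sumLen (S : List (List String)) : Nat := (S.map List.length).sum

-- the tails of the members of S whose head is n, in order (termination helper / characterisation)
def tailsAt : List (List String) → String → List (List String)
  | [], _ => []
  | [] :: S, n => tailsAt S n
  | (h :: t) :: S, n => if h = n then t :: tailsAt S n else tailsAt S n

theorem getD_foldl_groupStep (S : List (List String)) (n : String) :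
    ∀ d : PySem.Dict String (List (List String)),
      (S.foldl groupStep d).getD n [] = d.getD n [] ++ tailsAt S n := by
  induction S with
  | nil => simp [tailsAt]
  | cons s S ih =>
    intro d
    cases s with
    | nil => simpa [groupStep, tailsAt] using ih d
    | cons h t =>
      rw [List.foldl_cons, ih]
      show (PySem.Dict.modify d h [] (fun l => l ++ [t])).getD n [] ++ tailsAt S n = _
      rw [PySem.Dict.getD_modify]
      by_cases hn : n = h
      · subst hn; simp [tailsAt]
      · rw [if_neg hn, tailsAt]
        rw [if_neg (fun hh => hn hh.symm)]

theorem sumLen_tailsAt_le (S : List (List String)) (n : String) :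
    sumLen (tailsAt S n) ≤ sumLen S := by
  induction S with
  | nil => simp [tailsAt]
  | cons s S ih =>
    cases s with
    | nil => simpa [tailsAt, sumLen] using ih
    | cons h t =>
      rw [tailsAt]
      split
      · simp only [sumLen, List.map_cons, List.sum_cons, List.length_cons] at *; omega
      · simp only [sumLen, List.map_cons, List.sum_cons, List.length_cons] at *; omega

theorem sumLen_tailsAt_lt (S : List (List String)) (n : String) (h : tailsAt S n ≠ []) :
    sumLen (tailsAt S n) < sumLen S := by
  induction S with
  | nil => simp [tailsAt] at h
  | cons s S ih =>
    cases s with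
    | nil =>
      rw [tailsAt] at h
      simpa [sumLen] using ih h
    | cons hd t =>
      rw [tailsAt] at h ⊢
      split at h
      · have := sumLen_tailsAt_le S n
        rw [if_pos ‹hd = n›]
        simp only [sumLen, List.map_cons, List.sum_cons, List.length_cons] at *; omega
      · rw [if_neg ‹¬hd = n›]
        have := ih h
        simp only [sumLen, List.map_cons, List.sum_cons, List.length_cons] at *; omega

theorem sumLen_filter_le (S : List (List String)) (p : List String → Bool) :
    sumLen (S.filter p) ≤ sumLen S :=
  List.Sublist.sum_le_sum (List.Sublist.map List.length (List.filter_sublist (l := S))) (by simp)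

-- termination helper for render (cited in decreasing_by)
theorem rest_sumLen_lt (S : List (List String)) (n : String)
    (h : ((S.foldl groupStep PySem.Dict.empty).getD n []).filter (fun t => !t.isEmpty) ≠ []) :
    sumLen (((S.foldl groupStep PySem.Dict.empty).getD n []).filter (fun t => !t.isEmpty)) < sumLen S := by
  rw [getD_foldl_groupStep, PySem.Dict.getD_empty, List.nil_append] at h ⊢
  have hne : tailsAt S n ≠ [] := by
    intro he; rw [he] at h; exact h rfl
  exact lt_of_le_of_lt (sumLen_filter_le _ _) (sumLen_tailsAt_lt S n hne)

-- render(suffixes, prefix): group by head, emit sorted heads, recurse on nonempty tails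
def render (suffixes : List (List String)) (pre : String) : List String :=
  let groups := suffixes.foldl groupStep PySem.Dict.empty
  let names := PySem.List.sorted (PySem.Dict.keys groups) (fun x => x) false
  (PySem.List.enumerate names).flatMap (fun e =>
    (pre ++ (if e.1 == (names.length : Int) - 1 then "└── " else "├── ") ++ e.2) ::
    (if h : (PySem.Dict.getD groups e.2 []).filter (fun t => !t.isEmpty) = [] then []
     else render ((PySem.Dict.getD groups e.2 []).filter (fun t => !t.isEmpty))
       (pre ++ (if e.1 == (names.length : Int) - 1 then "    " else "│   "))))
termination_by sumLen suffixes
decreasing_by simp only [groups, List.foldl_attach] at h ⊢; exact rest_sumLen_lt suffixes e.2 h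

def build_tree_str_py_alt (paths : List String) : String :=
  let out := render ((PySem.List.sorted paths (fun x => x) false).map
      (fun p => (PySem.Str.split? p "/").getD [])) ""
  if out = [] then "(no files)" else PySem.Str.join "\n" out

-- ===== PRECONDITION & SPEC =====
def Spec_build_tree_str_py (paths : List String) (out : String) : Prop := out = build_tree_str_py_alt paths
instance (paths : List String) (out : String) : Decidable (Spec_build_tree_str_py paths out) := by unfold Spec_build_tree_str_py; infer_instance

-- ===== CLAIM (what is proved, stated in full; the proofs are below) =====
def Claim_equal_build_tree_str_py : Prop := ∀ (paths : List String), Dom_build_tree_str_py paths → Spec_build_tree_str_py paths (build_tree_str_py paths)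

-- ===== LEMMAS AND PROOFS =====

theorem insertSegs_nil_segs (t : PTrie) : insertSegs t [] = t := by
  cases t <;> simp [insertSegs]

theorem trieKeys_insertSegs_cons (t : PTrie) (h : String) (r : List String) :
    trieKeys (insertSegs t (h :: r)) =
      if h ∈ trieKeys t then trieKeys t else trieKeys t ++ [h] := by
  induction t with
  | nil => simp [insertSegs, trieKeys]
  | cons k c rest ihc ihr =>
    rw [insertSegs]
    by_cases hk : k = h
    · subst hk
      rw [if_pos rfl, trieKeys, trieKeys, if_pos (by simp)]
    · rw [if_neg hk, trieKeys, trieKeys, ihr]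
      by_cases hm : h ∈ trieKeys rest
      · rw [if_pos hm, if_pos (by simp [hm])]
      · rw [if_neg hm, if_neg (by simp [hm]; exact fun hh => hk hh.symm), List.cons_append]

theorem keys_foldl_eq (S : List (List String)) :
    ∀ (t : PTrie) (d : PySem.Dict String (List (List String))),
      trieKeys t = d.keys →
      trieKeys (S.foldl insertSegs t) = (S.foldl groupStep d).keys := by
  induction S with
  | nil => intro t d h; simpa using h
  | cons s S ih =>
    intro t d h
    rw [List.foldl_cons, List.foldl_cons]
    apply ih
    cases s with
    | nil => simpa [insertSegs_nil_segs, groupStep] using h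
    | cons hd r =>
      rw [trieKeys_insertSegs_cons, groupStep]
      rw [PySem.Dict.keys_modify]
      by_cases hm : hd ∈ trieKeys t
      · rw [if_pos hm, PySem.Dict.keys_insert_of_contains _ _ (by
          rw [PySem.Dict.contains_iff_mem_keys, ← h]; exact hm)]
        exact h
      · rw [if_neg hm, PySem.Dict.keys_insert_of_not_contains _ _ (by
          rw [← Bool.not_eq_true, PySem.Dict.contains_iff_mem_keys, ← h]; exact hm), h]

theorem trieGet_insertSegs_cons (t : PTrie) (h : String) (r : List String) (n : String) :
    trieGet (insertSegs t (h :: r)) n =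
      if h = n then insertSegs (trieGet t n) r else trieGet t n := by
  induction t with
  | nil =>
    by_cases hn : h = n
    · subst hn; simp [insertSegs, trieGet]
    · simp [insertSegs, trieGet, hn]
  | cons k c rest ihc ihr =>
    by_cases hk : k = h
    · subst hk
      by_cases hn : k = n
      · subst hn; simp [insertSegs, trieGet]
      · simp [insertSegs, trieGet, hn]
    · by_cases hn : k = n
      · subst hn
        have hn' : ¬ h = k := fun hh => hk hh.symm
        simp [insertSegs, trieGet, hk, hn']
      · simp [insertSegs, trieGet, hk, hn, ihr]

theorem trieGet_foldl (S : List (List String)) (n : String) :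
    ∀ t : PTrie, trieGet (S.foldl insertSegs t) n = (tailsAt S n).foldl insertSegs (trieGet t n) := by
  induction S with
  | nil => intro t; simp [tailsAt]
  | cons s S ih =>
    intro t
    cases s with
    | nil => rw [List.foldl_cons, tailsAt, insertSegs_nil_segs]; exact ih t
    | cons h r =>
      rw [List.foldl_cons, ih, trieGet_insertSegs_cons, tailsAt]
      by_cases hn : h = n
      · rw [if_pos hn, if_pos hn, List.foldl_cons]
      · rw [if_neg hn, if_neg hn]

theorem foldl_insertSegs_ne_nil (S : List (List String)) :
    ∀ t : PTrie, t ≠ PTrie.nil → S.foldl insertSegs t ≠ PTrie.nil := by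
  induction S with
  | nil => intro t h; simpa using h
  | cons s S ih =>
    intro t h
    rw [List.foldl_cons]
    apply ih
    cases s with
    | nil => rwa [insertSegs_nil_segs]
    | cons hd r =>
      cases t with
      | nil => simp [insertSegs]
      | cons k c rest => simp only [insertSegs]; split <;> simp

theorem foldl_insertSegs_filter (S : List (List String)) :
    ∀ t : PTrie, (S.filter (fun s => !s.isEmpty)).foldl insertSegs t = S.foldl insertSegs t := by
  induction S with
  | nil => intro t; rfl
  | cons s S ih =>
    intro t
    cases s with
    | nil => rw [List.filter_cons_of_neg (by simp), List.foldl_cons, insertSegs_nil_segs]; exact ih t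
    | cons h r => rw [List.filter_cons_of_pos (by simp), List.foldl_cons, List.foldl_cons]; exact ih _

theorem walkA_eq_render (N : Nat) :
    ∀ (S : List (List String)) (pre : String), sumLen S ≤ N →
      walkA (S.foldl insertSegs PTrie.nil) pre = render S pre := by
  induction N using Nat.strong_induction_on with
  | _ N ih =>
    intro S pre hN
    rw [walkA, render]
    have hkeys : trieKeys (S.foldl insertSegs PTrie.nil) = (S.foldl groupStep PySem.Dict.empty).keys :=
      keys_foldl_eq S PTrie.nil PySem.Dict.empty (by simp [trieKeys, PySem.Dict.empty, PySem.Dict.keys])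
    simp only [hkeys]
    congr 1
    funext e
    congr 1
    have h2 : (S.foldl groupStep PySem.Dict.empty).getD e.2 [] = tailsAt S e.2 := by
      rw [getD_foldl_groupStep, PySem.Dict.getD_empty, List.nil_append]
    have hchild : trieGet (S.foldl insertSegs PTrie.nil) e.2
        = (((S.foldl groupStep PySem.Dict.empty).getD e.2 []).filter (fun t => !t.isEmpty)).foldl
            insertSegs PTrie.nil := by
      rw [trieGet_foldl, h2, foldl_insertSegs_filter]
      rfl
    by_cases hr : ((S.foldl groupStep PySem.Dict.empty).getD e.2 []).filter (fun t => !t.isEmpty) = []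
    · rw [dif_pos hr, dif_pos (by rw [hchild, hr]; rfl)]
    · have hne : trieGet (S.foldl insertSegs PTrie.nil) e.2 ≠ PTrie.nil := by
        rw [hchild]
        rcases hrest : ((S.foldl groupStep PySem.Dict.empty).getD e.2 []).filter (fun t => !t.isEmpty) with
          _ | ⟨s, rest'⟩
        · exact absurd hrest hr
        · have hs : s ∈ ((S.foldl groupStep PySem.Dict.empty).getD e.2 []).filter (fun t => !t.isEmpty) := by
            rw [hrest]; exact List.mem_cons_self
          have hsne : ¬s.isEmpty := by simpa using List.of_mem_filter hs
          rw [hrest, List.foldl_cons]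
          apply foldl_insertSegs_ne_nil
          cases s with
          | nil => simp at hsne
          | cons hd tl => simp [insertSegs]
      rw [dif_neg hr, dif_neg hne, hchild]
      exact ih (sumLen (((S.foldl groupStep PySem.Dict.empty).getD e.2 []).filter (fun t => !t.isEmpty)))
        (Nat.lt_of_lt_of_le (rest_sumLen_lt S e.2 hr) hN) _ _ le_rfl

-- ===== VERDICT (by name: the statement is the Claim_ definition above) =====
theorem build_tree_str_py_spec : Claim_equal_build_tree_str_py := by
  intro paths _
  show build_tree_str_py paths = build_tree_str_py_alt paths
  have hroot : List.foldl (fun t p => insertSegs t ((PySem.Str.split? p "/").getD [])) PTrie.nil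
      (PySem.List.sorted paths (fun x => x) false)
      = List.foldl insertSegs PTrie.nil
        ((PySem.List.sorted paths (fun x => x) false).map (fun p => (PySem.Str.split? p "/").getD [])) :=
    (List.foldl_map).symm
  have hl : walkA (List.foldl insertSegs PTrie.nil
        ((PySem.List.sorted paths (fun x => x) false).map (fun p => (PySem.Str.split? p "/").getD []))) ""
      = render ((PySem.List.sorted paths (fun x => x) false).map (fun p => (PySem.Str.split? p "/").getD [])) "" :=
    walkA_eq_render _ _ _ le_rfl
  simp only [build_tree_str_py, build_tree_str_py_alt, hroot, hl]
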